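-- pv_equiv track=rewrite | github.com/worlddatong/MatFileViewer | MatFileViewer.py | get_variable_name
-- ===== SOURCE A (Python) =====
-- def get_variable_name(mat_dict: dict):
--     variable_name=None
--     for i in mat_dict.keys():
--         if i.startswith('__'):
--             pass
--         else:
--             variable_name=i
--     return variable_name
-- ===== SOURCE B (Python) =====
-- def get_variable_name(mat_dict: dict):
--     for i in reversed(mat_dict):
--         if not i.startswith('__'):
--             return i
--     return None
-- ===== Notes on version B (the rewrite author's own statement) =====
-- stated objective: idiomatic
-- what changed: Replaces the forward accumulate-last loop with a reverse scan that returns the first non-dunder key immediately (early exit).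
import Mathlib
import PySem

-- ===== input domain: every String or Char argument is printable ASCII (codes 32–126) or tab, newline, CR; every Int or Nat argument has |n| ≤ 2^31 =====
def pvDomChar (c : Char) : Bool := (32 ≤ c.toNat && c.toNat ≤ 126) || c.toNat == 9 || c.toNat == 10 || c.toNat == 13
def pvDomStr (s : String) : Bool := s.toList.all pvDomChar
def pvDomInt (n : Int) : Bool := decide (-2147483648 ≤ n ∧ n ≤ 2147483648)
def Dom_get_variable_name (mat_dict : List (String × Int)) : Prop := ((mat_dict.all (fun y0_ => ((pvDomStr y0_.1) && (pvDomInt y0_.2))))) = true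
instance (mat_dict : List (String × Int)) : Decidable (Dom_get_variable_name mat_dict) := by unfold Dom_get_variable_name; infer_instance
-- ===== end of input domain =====

-- ===== PORT A =====
def get_variable_name (mat_dict : List (String × Int)) : Option String :=
  mat_dict.foldl (fun variable_name kv =>
    if PySem.Str.startswith kv.1 "__" then variable_name else some kv.1) none

-- ===== PORT B =====
-- reverse scan with early exit: first key (going backwards) not starting with '__'
def altLoop : List String → Option String
  | [] => none
  | k :: rest => if PySem.Str.startswith k "__" then altLoop rest else some k

def get_variable_name_alt (mat_dict : List (String × Int)) : Option String :=
  altLoop (mat_dict.reverse.map Prod.fst)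

-- ===== PRECONDITION & SPEC =====
def Spec_get_variable_name (mat_dict : List (String × Int)) (out : Option String) : Prop := out = get_variable_name_alt mat_dict
instance (mat_dict : List (String × Int)) (out : Option String) : Decidable (Spec_get_variable_name mat_dict out) := by unfold Spec_get_variable_name; infer_instance

-- ===== CLAIM (what is proved, stated in full; the proofs are below) =====
def Claim_equal_get_variable_name : Prop := ∀ (mat_dict : List (String × Int)), Dom_get_variable_name mat_dict → Spec_get_variable_name mat_dict (get_variable_name mat_dict)

-- ===== LEMMAS AND PROOFS =====

-- ===== VERDICT (by name: the statement is the Claim_ definition above) =====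
theorem altLoop_append (ys zs : List String) :
    altLoop (ys ++ zs) = match altLoop ys with
      | some v => some v
      | none => altLoop zs := by
  induction ys with
  | nil => simp [altLoop]
  | cons y ys ih => by_cases h : PySem.Chars.startswith y.toList ['_', '_'] = true <;> simp [altLoop, h, ih]

theorem foldl_eq_altLoop (l : List (String × Int)) (acc : Option String) :
    l.foldl (fun variable_name kv =>
      if PySem.Str.startswith kv.1 "__" then variable_name else some kv.1) acc
    = match altLoop (l.reverse.map Prod.fst) with
      | some v => some v
      | none => acc := by
  induction l generalizing acc with
  | nil => simp [altLoop]
  | cons x xs ih =>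
    simp only [List.foldl_cons, ih, List.reverse_cons, List.map_append, altLoop_append]
    by_cases h : PySem.Chars.startswith x.1.toList ['_', '_'] = true <;>
      cases haux : altLoop (xs.reverse.map Prod.fst) <;> simp [altLoop, h, haux]

theorem get_variable_name_spec : Claim_equal_get_variable_name := by
  intro mat_dict _
  unfold Spec_get_variable_name get_variable_name get_variable_name_alt
  rw [foldl_eq_altLoop]
  cases altLoop (mat_dict.reverse.map Prod.fst) <;> simp
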